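-- pv_equiv track=rewrite | github.com/Yoga838/Kuliah | Tugas Mau Uas/security.py | deshifting
-- ===== SOURCE A (Python) =====
-- def deshifting(text, shift_number): # Pembuatan fungsi dengan nama deshifting dengan syarat fungsi dua parameter
--     result = '' # inisiasi string ke dalam variabel result
--     for i in text: # perulangan sebanyak isi variabel text
--         deshifted = ord(i) #mengubah nilai i ke dalam bentuk angka kemudian di simpan ke dalam variabl deshifted
--         if (deshifted-32)<=32: # pengkondisian apabila nilai deshifted - 32 kurang dari atau sama dengan 32
--             deshifted = deshifted-32+127-shift_number # nilai deshifted dikurangi 32 kemudian di tambah 127 lalu dikurangi dengan nilai variabel shift_number setelah itu disimpan ke dalam variabel deshifted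
--         else: # pengkondisian ketika semua pengkondisian tidak bisa terpenuhi
--             deshifted = deshifted-shift_number # nilai deshifted dikurangi nilai shift_number lalu disimpen kedalam variable deshifted
--         result += chr(deshifted) # mengubah nilai ascii deshifted ke dalam bentuk karakter kemudian di tambahkan ke dalam variabel result
--     return result #mengembalikan nilai yang diperoleh kedalam variabel result
-- ===== SOURCE B (Python) =====
-- def deshifting(text, shift_number):
--     # Partition the positions by character class first, then scatter-write each
--     # group's shifted characters into a preallocated slot array and join once.
--     n = len(text)
--     lows = [i for i, c in enumerate(text) if ord(c) <= 64]
--     highs = [i for i, c in enumerate(text) if not ord(c) <= 64]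
--     out = [''] * n
--     for i in lows:
--         out[i] = chr(ord(text[i]) + 95 - shift_number)
--     for i in highs:
--         out[i] = chr(ord(text[i]) - shift_number)
--     return ''.join(out)
-- ===== Notes on version B (the rewrite author's own statement) =====
-- stated objective: alternative
-- what changed: Instead of A's single left-to-right pass with an inline branch and string concatenation, B first partitions the index set into the two character classes, then scatter-writes each group's shifted characters (branch-free per loop) into a preallocated slot array and joins once.
import Mathlib
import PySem

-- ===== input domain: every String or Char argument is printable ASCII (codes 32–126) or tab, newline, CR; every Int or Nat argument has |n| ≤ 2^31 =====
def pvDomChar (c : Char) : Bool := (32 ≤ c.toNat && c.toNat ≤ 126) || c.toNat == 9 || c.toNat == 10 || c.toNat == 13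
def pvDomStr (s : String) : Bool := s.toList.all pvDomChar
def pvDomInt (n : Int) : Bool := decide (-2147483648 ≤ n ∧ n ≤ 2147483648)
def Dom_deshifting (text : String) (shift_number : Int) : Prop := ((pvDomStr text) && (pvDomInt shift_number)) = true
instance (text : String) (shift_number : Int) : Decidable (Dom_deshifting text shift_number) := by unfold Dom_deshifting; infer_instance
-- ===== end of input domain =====

-- B partitions the positions by character class, scatter-writes each group into a slot array
-- and joins once, instead of A's single accumulating pass with an inline branch (objective: alternative).

-- Python's chr(n); exact whenever Pre_deshifting holds (0 ≤ n, n ≤ 0x10FFFF, not a surrogate).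
def pyChr (n : Int) : Char := Char.ofNat n.toNat

-- ===== PORT A =====
def deshifting (text : String) (shift_number : Int) : String :=
  String.ofList (text.toList.foldl (fun result i =>
    let deshifted : Int := (i.toNat : Int)
    let deshifted := if deshifted - 32 ≤ 32 then deshifted - 32 + 127 - shift_number
                     else deshifted - shift_number
    result ++ [pyChr deshifted]) [])

-- ===== PORT B =====
-- The one-character strings B writes into the slot array (chr(ord(text[i]) + 95 - k) / chr(ord(text[i]) - k)).
def writeLow (cs : List Char) (s : Int) (j : Nat) : String :=
  String.ofList [pyChr (((cs.getD j ' ').toNat : Int) + 95 - s)]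
def writeHigh (cs : List Char) (s : Int) (j : Nat) : String :=
  String.ofList [pyChr (((cs.getD j ' ').toNat : Int) - s)]

def deshifting_alt (text : String) (shift_number : Int) : String :=
  let cs := text.toList
  let n := cs.length
  let lows := ((PySem.List.enumerate cs).filter (fun p => decide (p.2.toNat ≤ 64))).map Prod.fst
  let highs := ((PySem.List.enumerate cs).filter (fun p => decide (¬ p.2.toNat ≤ 64))).map Prod.fst
  let out0 : List String := List.replicate n ""
  let out1 := lows.foldl (fun o i => o.set i.toNat (writeLow cs shift_number i.toNat)) out0
  let out2 := highs.foldl (fun o i => o.set i.toNat (writeHigh cs shift_number i.toNat)) out1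
  PySem.Str.join "" out2

-- ===== PRECONDITION & SPEC =====
-- Pre_ excludes the inputs where A raises (chr gets a code point outside 0..0x10FFFF) and those
-- where the shifted code lands in the surrogate range U+D800–U+DFFF, where A's Python return
-- value is a string that is not representable as a Lean String.
def Pre_deshifting (text : String) (shift_number : Int) : Prop :=
  (text.toList.all (fun c =>
    let d : Int := (c.toNat : Int) + (if (c.toNat : Int) ≤ 64 then 95 - shift_number else -shift_number)
    (0 ≤ d && d < 55296) || (57344 ≤ d && d ≤ 1114111))) = true
instance (text : String) (shift_number : Int) : Decidable (Pre_deshifting text shift_number) := by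
  unfold Pre_deshifting; infer_instance

def pvWitness_deshifting : String × Int := ("Hello World!", 30)

def Spec_deshifting (text : String) (shift_number : Int) (out : String) : Prop := out = deshifting_alt text shift_number
instance (text : String) (shift_number : Int) (out : String) : Decidable (Spec_deshifting text shift_number out) := by unfold Spec_deshifting; infer_instance

-- ===== CLAIM (what is proved, stated in full; the proofs are below) =====
def Claim_equal_deshifting : Prop := ∀ (text : String) (shift_number : Int), Dom_deshifting text shift_number → Pre_deshifting text shift_number → Spec_deshifting text shift_number (deshifting text shift_number)

-- ===== LEMMAS AND PROOFS =====

-- The character A appends for an input character c (the fused branch).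
def aChar (s : Int) (c : Char) : Char :=
  pyChr (if (c.toNat : Int) - 32 ≤ 32 then (c.toNat : Int) - 32 + 127 - s else (c.toNat : Int) - s)

-- Scatter-writing values that depend only on the index preserves length.
theorem length_scatterI {α : Type} (g : Nat → α) (idxs : List Int) (o0 : List α) :
    (idxs.foldl (fun o i => o.set i.toNat (g i.toNat)) o0).length = o0.length := by
  induction idxs generalizing o0 with
  | nil => rfl
  | cons i is ih => simp [ih]

-- Scatter-writing values that depend only on the index: cell j holds g j iff j was written.
theorem getElem?_scatterI {α : Type} (g : Nat → α) (idxs : List Int) (o0 : List α) (j : Nat) :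
    (idxs.foldl (fun o i => o.set i.toNat (g i.toNat)) o0)[j]? =
      if j ∈ idxs.map Int.toNat ∧ j < o0.length then some (g j) else o0[j]? := by
  induction idxs generalizing o0 with
  | nil => simp
  | cons i is ih =>
    simp only [List.foldl_cons, ih, List.length_set, List.map_cons, List.mem_cons,
      List.getElem?_set]
    by_cases hA : j ∈ is.map Int.toNat ∧ j < o0.length
    · rw [if_pos hA, if_pos ⟨Or.inr hA.1, hA.2⟩]
    · rw [if_neg hA]
      by_cases h2 : i.toNat = j
      · subst h2
        by_cases hl : i.toNat < o0.length
        · rw [if_pos rfl, if_pos hl, if_pos ⟨Or.inl rfl, hl⟩]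
        · rw [if_pos rfl, if_neg hl,
             if_neg (show ¬((i.toNat = i.toNat ∨ i.toNat ∈ is.map Int.toNat) ∧
               i.toNat < o0.length) from fun h => hl h.2)]
          exact (List.getElem?_eq_none_iff.mpr (by omega)).symm
      · rw [if_neg h2,
           if_neg (show ¬((j = i.toNat ∨ j ∈ is.map Int.toNat) ∧ j < o0.length) from
             fun h => h.1.elim (fun e => h2 e.symm) (fun hm => hA ⟨hm, h.2⟩))]

-- Membership in B's partitioned (Nat-converted) index lists.
theorem mem_idx_filter (cs : List Char) (P : Char → Bool) (j : Nat) :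
    (j ∈ (((PySem.List.enumerate cs).filter (fun p => P p.2)).map Prod.fst).map Int.toNat) ↔
      ∃ _ : j < cs.length, P (cs.getD j ' ') = true := by
  rw [List.map_map, List.mem_map]
  constructor
  · rintro ⟨p, hp, hpj⟩
    rw [List.mem_filter] at hp
    obtain ⟨hmem, hP⟩ := hp
    rw [PySem.List.mem_enumerate_iff] at hmem
    obtain ⟨k, hk, rfl⟩ := hmem
    simp only [Function.comp, zero_add, Int.toNat_natCast] at hpj hP
    subst hpj
    exact ⟨hk, by rw [List.getD_eq_getElem _ _ hk]; exact hP⟩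
  · rintro ⟨hj, hP⟩
    rw [List.getD_eq_getElem _ _ hj] at hP
    refine ⟨((j : Int), cs[j]), ?_, by simp⟩
    rw [List.mem_filter]
    exact ⟨(PySem.List.mem_enumerate_iff cs 0 _).mpr ⟨j, hj, by simp⟩, hP⟩

-- B's scatter phase produces exactly the per-character map A computes.
theorem scatter_result (cs : List Char) (s : Int) :
    ((((PySem.List.enumerate cs).filter (fun p => decide (¬ p.2.toNat ≤ 64))).map Prod.fst).foldl
      (fun o i => o.set i.toNat (writeHigh cs s i.toNat))
      ((((PySem.List.enumerate cs).filter (fun p => decide (p.2.toNat ≤ 64))).map Prod.fst).foldl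
        (fun o i => o.set i.toNat (writeLow cs s i.toNat))
        (List.replicate cs.length "")))
    = cs.map (fun c => String.ofList [aChar s c]) := by
  apply List.ext_getElem?
  intro j
  rw [getElem?_scatterI (writeHigh cs s), getElem?_scatterI (writeLow cs s),
      length_scatterI, List.length_replicate]
  by_cases hj : j < cs.length
  · rw [List.getElem?_map, List.getElem?_eq_getElem hj, Option.map_some]
    have hg : cs.getD j ' ' = cs[j] := List.getD_eq_getElem _ _ hj
    by_cases hc : (cs.getD j ' ').toNat ≤ 64
    · have hhi : ¬ (j ∈ (((PySem.List.enumerate cs).filter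
          (fun p => decide (¬ p.2.toNat ≤ 64))).map Prod.fst).map Int.toNat) := by
        rw [mem_idx_filter cs (fun c => decide (¬ c.toNat ≤ 64)) j]
        rintro ⟨_, hP⟩
        exact absurd hc (by simpa using hP)
      have hlo : j ∈ (((PySem.List.enumerate cs).filter
          (fun p => decide (p.2.toNat ≤ 64))).map Prod.fst).map Int.toNat := by
        rw [mem_idx_filter cs (fun c => decide (c.toNat ≤ 64)) j]
        exact ⟨hj, by simpa using hc⟩
      rw [if_neg (fun h => hhi h.1), if_pos ⟨hlo, hj⟩]
      have hcond : ((cs[j].toNat : Int) - 32 ≤ 32) := by rw [hg] at hc; omega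
      simp only [writeLow, aChar, hg, if_pos hcond]
      have harith : ((cs[j].toNat : Int)) + 95 - s = (cs[j].toNat : Int) - 32 + 127 - s := by omega
      rw [harith]
    · have hhi : j ∈ (((PySem.List.enumerate cs).filter
          (fun p => decide (¬ p.2.toNat ≤ 64))).map Prod.fst).map Int.toNat := by
        rw [mem_idx_filter cs (fun c => decide (¬ c.toNat ≤ 64)) j]
        exact ⟨hj, by simpa using hc⟩
      rw [if_pos ⟨hhi, hj⟩]
      have hcond : ¬ ((cs[j].toNat : Int) - 32 ≤ 32) := by rw [hg] at hc; omega
      simp only [writeHigh, aChar, hg, if_neg hcond]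
  · have h1 : ¬ (j ∈ (((PySem.List.enumerate cs).filter
        (fun p => decide (¬ p.2.toNat ≤ 64))).map Prod.fst).map Int.toNat ∧ j < cs.length) := by
      intro h; exact hj h.2
    have h2 : ¬ (j ∈ (((PySem.List.enumerate cs).filter
        (fun p => decide (p.2.toNat ≤ 64))).map Prod.fst).map Int.toNat ∧ j < cs.length) := by
      intro h; exact hj h.2
    rw [if_neg h1, if_neg h2]
    simp [Nat.le_of_not_lt hj]

theorem deshifting_spec' (text : String) (shift_number : Int) :
    deshifting text shift_number = deshifting_alt text shift_number := by
  unfold deshifting deshifting_alt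
  simp only [PySem.List.foldl_append_singleton_eq_map, List.nil_append]
  rw [← String.toList_inj, String.toList_ofList, PySem.Str.toList_join, scatter_result]
  rw [List.map_map]
  have h1 : (String.toList ∘ fun c => String.ofList [aChar shift_number c])
      = fun c => [aChar shift_number c] := funext fun c => String.toList_ofList
  rw [h1, show (fun c => [aChar shift_number c])
        = (fun c => [c]) ∘ aChar shift_number from rfl,
     ← List.map_map, show ("" : String).toList = [] from rfl,
     PySem.Chars.join_nil_singletons]
  exact List.map_congr_left (fun c _ => rfl)

-- ===== VERDICT (by name: the statement is the Claim_ definition above) =====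
theorem deshifting_spec : Claim_equal_deshifting := by
  intro text shift_number _ _
  exact deshifting_spec' text shift_number
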